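-- pv_equiv track=rewrite | github.com/ongkaiCompany/FileChatBot | FileChatty.py | isSummarizationRequest
-- ===== SOURCE A (Python) =====
-- def isSummarizationRequest(userQues):
--     summarization_keywords = ["summarize", "summarise","summary", "brief", "overview"]
--     context_keywords = ["file", "document", "text"]
--     question_forms = ["can you", "please", "could you", "would you"]
--     user_input_lower = userQues.lower()
--     contains_summarizationKey = any(keyword in user_input_lower for keyword in summarization_keywords)
--     contains_contextKey = any(keyword in user_input_lower for keyword in context_keywords)
--     contains_questionForm = any(form in user_input_lower for form in question_forms)
--     contains_addRule = "file summary" in user_input_lower or "provide an overview" in user_input_lower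
--     return (
--         (contains_summarizationKey and contains_contextKey) or
--         (contains_questionForm and contains_addRule) or contains_summarizationKey
--     )
-- ===== SOURCE B (Python) =====
-- def isSummarizationRequest(userQues):
--     s = userQues.lower()
--     return any(kw in s for kw in ("summarize", "summarise", "summary", "brief", "overview"))
-- ===== Notes on version B (the rewrite author's own statement) =====
-- stated objective: simpler
-- what changed: The boolean formula ((S and C) or (Q and D) or S) collapses to S because the add-rule substrings themselves contain a summarization keyword, so B lowercases once and does a single keyword scan, dropping the context/question-form/add-rule machinery.
import Mathlib
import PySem

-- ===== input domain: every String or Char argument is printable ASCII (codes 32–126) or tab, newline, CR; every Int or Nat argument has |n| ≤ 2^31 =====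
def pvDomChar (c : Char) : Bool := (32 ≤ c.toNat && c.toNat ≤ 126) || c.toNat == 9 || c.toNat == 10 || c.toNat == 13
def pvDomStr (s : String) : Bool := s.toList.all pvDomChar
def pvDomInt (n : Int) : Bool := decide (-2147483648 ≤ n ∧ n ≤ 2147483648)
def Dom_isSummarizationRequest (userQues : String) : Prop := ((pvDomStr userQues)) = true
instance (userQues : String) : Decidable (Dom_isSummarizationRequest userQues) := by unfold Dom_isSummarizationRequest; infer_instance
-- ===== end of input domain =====

-- B replaces A's three keyword scans and boolean formula by one lowercase pass and a single
-- summarization-keyword scan; the other clauses are absorbed (objective: simpler).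

-- ===== PORT A =====
def isSummarizationRequest (userQues : String) : Bool :=
  let summarization_keywords := ["summarize", "summarise", "summary", "brief", "overview"]
  let context_keywords := ["file", "document", "text"]
  let question_forms := ["can you", "please", "could you", "would you"]
  let user_input_lower := PySem.Str.lower userQues
  let contains_summarizationKey := summarization_keywords.any (fun keyword => PySem.Str.isIn keyword user_input_lower)
  let contains_contextKey := context_keywords.any (fun keyword => PySem.Str.isIn keyword user_input_lower)
  let contains_questionForm := question_forms.any (fun form => PySem.Str.isIn form user_input_lower)
  let contains_addRule := PySem.Str.isIn "file summary" user_input_lower || PySem.Str.isIn "provide an overview" user_input_lower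
  (contains_summarizationKey && contains_contextKey) ||
    (contains_questionForm && contains_addRule) || contains_summarizationKey

-- ===== PORT B =====
def isSummarizationRequest_alt (userQues : String) : Bool :=
  let s := PySem.Str.lower userQues
  ["summarize", "summarise", "summary", "brief", "overview"].any (fun kw => PySem.Str.isIn kw s)

-- ===== PRECONDITION & SPEC =====
def Spec_isSummarizationRequest (userQues : String) (out : Bool) : Prop := out = isSummarizationRequest_alt userQues
instance (userQues : String) (out : Bool) : Decidable (Spec_isSummarizationRequest userQues out) := by unfold Spec_isSummarizationRequest; infer_instance

-- ===== CLAIM (what is proved, stated in full; the proofs are below) =====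
def Claim_equal_isSummarizationRequest : Prop := ∀ (userQues : String), Dom_isSummarizationRequest userQues → Spec_isSummarizationRequest userQues (isSummarizationRequest userQues)

-- ===== LEMMAS AND PROOFS =====

-- substring monotonicity: a hit on A's add-rule phrases forces a summarization-keyword hit
theorem isIn_of_sub_infix (sub sub' : String) (s : String)
    (hss : sub.toList <:+: sub'.toList) (h : PySem.Str.isIn sub' s = true) :
    PySem.Str.isIn sub s = true := by
  rw [PySem.Str.isIn_iff_infix] at h ⊢
  exact hss.trans h

theorem isSummarizationRequest_spec : Claim_equal_isSummarizationRequest := by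
  intro u _
  unfold Spec_isSummarizationRequest isSummarizationRequest isSummarizationRequest_alt
  simp only [List.any_cons, List.any_nil, Bool.or_false]
  set s := PySem.Str.lower u with hs
  cases hfs : PySem.Str.isIn "file summary" s with
  | true =>
      have h2 := isIn_of_sub_infix "summary" "file summary" s (by decide) hfs
      simp at h2
      simp [h2]
  | false =>
      cases hpo : PySem.Str.isIn "provide an overview" s with
      | true =>
          have h2 := isIn_of_sub_infix "overview" "provide an overview" s (by decide) hpo
          simp at h2
          simp [h2]
      | false =>
          simp only [Bool.or_false, Bool.and_false]
          cases PySem.Str.isIn "summarize" s <;> cases PySem.Str.isIn "summarise" s <;>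
            cases PySem.Str.isIn "summary" s <;> cases PySem.Str.isIn "brief" s <;>
            cases PySem.Str.isIn "overview" s <;> simp

-- ===== VERDICT (by name: the statement is the Claim_ definition above) =====
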